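-- pv_equiv track=rewrite | github.com/StanLivitski/cards.webapp | web.src/cards_web/connect.py | parse_netloc
-- ===== SOURCE A (Python) =====
-- def parse_netloc(hostport):
--     """
--     Split a host-port production present in the URL into
--     its constituent parts: host name/address string,
--     and an optional integer port.
--
--     Raises
--     ------
--     ValueError
--         When host part is missing from the argument.
--     """
--     hostport = hostport.strip()
--     port = None
--     at = len(hostport)
--     while 0 < at:
--         at -= 1
--         if not hostport[at].isdigit():
--             break
--     if hostport and 0 <= at and ':' == hostport[at]:
--         host = hostport[:at].strip()
--         if len(hostport) > at + 1:
--             port = int(hostport[at + 1:])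
--     else:
--         host = hostport
--     if not host:
--         raise ValueError(
--             'Invalid host:port value: %s'
--             % repr(hostport)
--         )
--     return host, port
-- ===== SOURCE B (Python) =====
-- def parse_netloc(hostport):
--     """Split a host-port production into host and optional integer port."""
--     hostport = hostport.strip()
--     head, sep, tail = hostport.rpartition(':')
--     if sep and (tail == '' or tail.isdigit()):
--         host = head.strip()
--         port = int(tail) if tail else None
--     else:
--         host, port = hostport, None
--     if not host:
--         raise ValueError('Invalid host:port value: %s' % repr(hostport))
--     return host, port
-- ===== Notes on version B (the rewrite author's own statement) =====
-- stated objective: simpler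
-- what changed: Replaces A's backward index-scanning while-loop interleaved with colon detection by a single rpartition(':') split followed by validating the digit suffix.
import Mathlib
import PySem

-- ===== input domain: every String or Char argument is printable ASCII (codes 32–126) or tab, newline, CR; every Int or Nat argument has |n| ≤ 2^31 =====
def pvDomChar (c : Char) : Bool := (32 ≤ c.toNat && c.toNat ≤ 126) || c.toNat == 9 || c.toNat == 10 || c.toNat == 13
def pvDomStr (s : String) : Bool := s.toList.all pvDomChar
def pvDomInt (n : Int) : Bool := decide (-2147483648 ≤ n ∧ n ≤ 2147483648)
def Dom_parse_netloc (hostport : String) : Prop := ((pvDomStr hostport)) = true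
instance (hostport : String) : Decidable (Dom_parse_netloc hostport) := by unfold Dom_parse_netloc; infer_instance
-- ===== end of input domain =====

-- B replaces A's backward scan-for-digits-then-check-colon while-loop by a split at the last ':'
-- (rpartition) followed by validating the suffix; objective: simpler. A's ValueError (empty host)
-- is excluded by Pre_parse_netloc.

-- ===== PORT A =====
-- A's while-loop: `at = len(l); while 0 < at: at -= 1; if not l[at].isdigit(): break`, returning the final `at`.
def pvLoopA (l : List Char) : Nat → Nat
  | 0 => 0
  | n + 1 => if ¬ (PySem.Chars.isdigit (l.getD n ' ') = true) then n else pvLoopA l n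

-- `0 <= at` of the Python test is trivially true for a Nat index; where A raises ValueError
-- (empty host) the port just returns the pair — those inputs are excluded by Pre_parse_netloc.
def parse_netloc (hostport : String) : String × Option Int :=
  let l := PySem.Chars.strip hostport.toList
  let at_ := pvLoopA l l.length
  if l ≠ [] ∧ l.getD at_ ' ' = ':' then
    (String.ofList (PySem.Chars.strip (l.take at_)),
     if at_ + 1 < l.length then PySem.Int.ofChars? (l.drop (at_ + 1)) else none)
  else
    (String.ofList l, none)

-- ===== PORT B =====
-- hostport.rpartition(':') restricted to what B uses: `some (head, tail)` split at the LAST ':'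
-- (so ':' ∉ tail), `none` when there is no ':' in the string.
def pvRPartColon : List Char → Option (List Char × List Char)
  | [] => none
  | c :: rest =>
    match pvRPartColon rest with
    | some (h, t) => some (c :: h, t)
    | none => if c = ':' then some ([], rest) else none

def parse_netloc_alt (hostport : String) : String × Option Int :=
  let l := PySem.Chars.strip hostport.toList
  match pvRPartColon l with
  | some (h, t) =>
    if t = [] ∨ PySem.Chars.strIsdigit t = true then
      (String.ofList (PySem.Chars.strip h), if t = [] then none else PySem.Int.ofChars? t)
    else (String.ofList l, none)
  | none => (String.ofList l, none)

-- ===== PRECONDITION & SPEC =====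
-- Pre_ excludes exactly the inputs on which A raises ValueError (missing host part):
-- those whose stripped form is empty or is a ':' followed only by digits (empty host part).
def Pre_parse_netloc (hostport : String) : Prop :=
  let l := PySem.Chars.strip hostport.toList
  l ≠ [] ∧ ¬ (l.head? = some ':' ∧ l.tail.all PySem.Chars.isdigit = true)
instance (hostport : String) : Decidable (Pre_parse_netloc hostport) := by
  unfold Pre_parse_netloc; infer_instance
def pvWitness_parse_netloc : String := "example.com:80"

def Spec_parse_netloc (hostport : String) (out : String × Option Int) : Prop := out = parse_netloc_alt hostport
instance (hostport : String) (out : String × Option Int) : Decidable (Spec_parse_netloc hostport out) := by unfold Spec_parse_netloc; infer_instance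

-- ===== CLAIM (what is proved, stated in full; the proofs are below) =====
def Claim_equal_parse_netloc : Prop := ∀ (hostport : String), Dom_parse_netloc hostport → Pre_parse_netloc hostport → Spec_parse_netloc hostport (parse_netloc hostport)

-- ===== LEMMAS AND PROOFS =====

-- A's loop only reads digit cells down from `n`: while every index in [j, n) holds a digit,
-- the scan from `n` reaches `j`.
theorem pvLoopA_digits (l : List Char) :
    ∀ n j, j ≤ n → (∀ m, j ≤ m → m < n → PySem.Chars.isdigit (l.getD m ' ') = true) →
      pvLoopA l n = pvLoopA l j := by
  intro n
  induction n with
  | zero => intro j hj _; interval_cases j; rfl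
  | succ n ih =>
    intro j hj hdig
    rcases Nat.eq_or_lt_of_le hj with h | h
    · rw [h]
    · have hjn : j ≤ n := Nat.lt_succ_iff.mp h
      have hd : PySem.Chars.isdigit (l.getD n ' ') = true :=
        hdig n hjn (Nat.lt_succ_self n)
      show (if ¬ (PySem.Chars.isdigit (l.getD n ' ') = true) then n else pvLoopA l n) = _
      rw [if_neg (not_not_intro hd)]
      exact ih j hjn (fun m hm hmn => hdig m hm (Nat.lt_succ_of_lt hmn))

theorem pvLoopA_stop (l : List Char) (k : Nat) (c : Char)
    (hg : l.getD k ' ' = c) (hc : PySem.Chars.isdigit c = false) :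
    pvLoopA l (k + 1) = k := by
  show (if ¬ (PySem.Chars.isdigit (l.getD k ' ') = true) then k else pvLoopA l k) = k
  rw [hg, if_pos (by simp [hc])]

theorem pvRPartColon_none (l : List Char) (h : ':' ∉ l) : pvRPartColon l = none := by
  induction l with
  | nil => rfl
  | cons c rest ih =>
    have hc : c ≠ ':' := fun hc => h (hc ▸ List.mem_cons_self)
    have : pvRPartColon rest = none := ih (fun hm => h (List.mem_cons_of_mem c hm))
    simp [pvRPartColon, this, hc]

theorem pvRPartColon_last (h t : List Char) (ht : ':' ∉ t) :
    pvRPartColon (h ++ ':' :: t) = some (h, t) := by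
  induction h with
  | nil => simp [pvRPartColon, pvRPartColon_none t ht]
  | cons c h' ih => simp [pvRPartColon, ih]

-- every list splits as (prefix ending in a non-digit, or empty) ++ (maximal digit suffix)
theorem digit_suffix_decomp (t : List Char) :
    ∃ p s, t = p ++ s ∧ s.all PySem.Chars.isdigit = true ∧
      (p = [] ∨ ∃ q c, p = q ++ [c] ∧ PySem.Chars.isdigit c = false) := by
  induction t using List.reverseRecOn with
  | nil => exact ⟨[], [], by simp⟩
  | append_singleton t' d ih =>
    by_cases hd : PySem.Chars.isdigit d = true
    · obtain ⟨p, s, rfl, hs, hp⟩ := ih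
      exact ⟨p, s ++ [d], by simp, by simp [List.all_append, hs, hd], hp⟩
    · exact ⟨t' ++ [d], [], by simp, by simp, Or.inr ⟨t', d, rfl, by simpa using hd⟩⟩

theorem last_colon_decomp (l : List Char) (h : ':' ∈ l) :
    ∃ hd t, l = hd ++ ':' :: t ∧ ':' ∉ t := by
  induction l using List.reverseRecOn with
  | nil => simp at h
  | append_singleton l' x ih =>
    by_cases hx : x = ':'
    · exact ⟨l', [], by simp [hx], by simp⟩
    · have : ':' ∈ l' := by
        rcases List.mem_append.mp h with h' | h'
        · exact h'
        · simp at h'; exact absurd h'.symm hx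
      obtain ⟨hd, t, rfl, hnt⟩ := ih this
      exact ⟨hd, t ++ [x], by simp, by
        intro hm
        rcases List.mem_append.mp hm with h' | h'
        · exact hnt h'
        · simp at h'; exact hx h'.symm⟩

-- indices from p.length on in p ++ s (s all digits) hold digits
theorem getD_digits (p s : List Char) (hs : s.all PySem.Chars.isdigit = true)
    (m : Nat) (hm : p.length ≤ m) (hm2 : m < (p ++ s).length) :
    PySem.Chars.isdigit ((p ++ s).getD m ' ') = true := by
  rw [List.getD_append_right p s ' ' m hm]
  have hlt : m - p.length < s.length := by simp at hm2; omega
  rw [List.getD_eq_getElem s ' ' hlt]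
  exact List.all_eq_true.mp hs _ (List.getElem_mem hlt)

-- the core fact: A's scan-then-check body equals B's rpartition-then-validate body
theorem pv_core (l : List Char) :
    (if l ≠ [] ∧ l.getD (pvLoopA l l.length) ' ' = ':' then
      (String.ofList (PySem.Chars.strip (l.take (pvLoopA l l.length))),
       if pvLoopA l l.length + 1 < l.length then
         PySem.Int.ofChars? (l.drop (pvLoopA l l.length + 1)) else none)
     else (String.ofList l, none))
    = (match pvRPartColon l with
       | some (h, t) =>
         if t = [] ∨ PySem.Chars.strIsdigit t = true then
           (String.ofList (PySem.Chars.strip h), if t = [] then none else PySem.Int.ofChars? t)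
         else (String.ofList l, none)
       | none => (String.ofList l, none)) := by
  by_cases hc : ':' ∈ l
  · obtain ⟨hd, t, rfl, hnt⟩ := last_colon_decomp l hc
    obtain ⟨p, s, rfl, hs, hp⟩ := digit_suffix_decomp t
    rcases hp with rfl | ⟨q, c, rfl, hcd⟩
    · -- t = s is all digits: both split at the colon
      simp only [List.nil_append] at hnt ⊢
      simp only [pvRPartColon_last hd s hnt]
      have hat : pvLoopA (hd ++ ':' :: s) (hd ++ ':' :: s).length = hd.length := by
        have h1 : pvLoopA (hd ++ ':' :: s) (hd ++ ':' :: s).length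
            = pvLoopA (hd ++ ':' :: s) (hd.length + 1) := by
          apply pvLoopA_digits
          · simp
          · intro m hm hm2
            have h := getD_digits (hd ++ [':']) s hs m (by simpa using hm)
              (by simpa using hm2)
            simpa using h
        rw [h1]
        apply pvLoopA_stop _ _ ':'
        · rw [List.getD_append_right hd (':' :: s) ' ' hd.length le_rfl]; simp
        · decide
      have hgd : (hd ++ ':' :: s).getD hd.length ' ' = ':' := by
        rw [List.getD_append_right hd (':' :: s) ' ' hd.length le_rfl]; simp
      rw [hat, if_pos ⟨by simp, hgd⟩]
      have htake : (hd ++ ':' :: s).take hd.length = hd := List.take_left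
      have hdrop : (hd ++ ':' :: s).drop (hd.length + 1) = s := by
        rw [← List.drop_drop, List.drop_left]; rfl
      have hlen : (hd.length + 1 < (hd ++ ':' :: s).length) ↔ s ≠ [] := by
        rw [← List.length_pos_iff]; simp
      rcases eq_or_ne s [] with rfl | hsne
      · simp [htake]
      · rw [htake, hdrop, if_pos (hlen.mpr hsne), if_neg hsne,
          if_pos (Or.inr (by simp [PySem.Chars.strIsdigit, hs, hsne]))]
    · -- t ends its non-digit run with c ≠ ':' : neither side splits
      have hcc : c ≠ ':' := fun h => hnt (h ▸ by simp)
      have hne : ¬ ((q ++ [c]) ++ s = [] ∨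
          PySem.Chars.strIsdigit ((q ++ [c]) ++ s) = true) := by
        push Not
        refine ⟨by simp, ?_⟩
        simp only [PySem.Chars.strIsdigit, List.all_append, List.all_cons, List.all_nil]
        simp [hcd]
      simp only [pvRPartColon_last hd _ hnt]
      rw [if_neg hne]
      set l := hd ++ ':' :: ((q ++ [c]) ++ s) with hl
      have hP : l = ((hd ++ ':' :: q) ++ [c]) ++ s := by simp [hl]
      have hat : pvLoopA l l.length = (hd ++ ':' :: q).length := by
        have h1 : pvLoopA l l.length = pvLoopA l ((hd ++ ':' :: q).length + 1) := by
          apply pvLoopA_digits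
          · simp [hl]
          · intro m hm hm2
            rw [hP]
            exact getD_digits ((hd ++ ':' :: q) ++ [c]) s hs m (by simpa using hm)
              (by rw [← hP]; exact hm2)
        rw [h1]
        apply pvLoopA_stop _ _ c _ hcd
        rw [hP, List.append_assoc]
        rw [List.getD_append_right (hd ++ ':' :: q) ([c] ++ s) ' ' _ le_rfl]
        simp
      have hgd : l.getD (pvLoopA l l.length) ' ' = c := by
        rw [hat, hP, List.append_assoc,
          List.getD_append_right (hd ++ ':' :: q) ([c] ++ s) ' ' _ le_rfl]
        simp
      rw [if_neg (by rw [hgd]; exact fun h => hcc h.2)]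
  · simp only [pvRPartColon_none l hc]
    rcases eq_or_ne l [] with rfl | hne
    · simp
    · -- no colon: A's check at `at_` sees a non-colon character
      obtain ⟨p, s, rfl, hs, hp⟩ := digit_suffix_decomp l
      rcases hp with rfl | ⟨q, c, rfl, hcd⟩
      · -- all digits: at_ = 0 and l[0] is a digit
        simp only [List.nil_append] at *
        have hat : pvLoopA s s.length = 0 := by
          rw [pvLoopA_digits s s.length 0 (Nat.zero_le _)
            (fun m _ hm2 => getD_digits [] s hs m (Nat.zero_le _) (by simpa using hm2))]
          rfl
        have h0 : PySem.Chars.isdigit (s.getD 0 ' ') = true :=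
          getD_digits [] s hs 0 (Nat.zero_le _) (by simpa using List.length_pos_iff.mpr hne)
        rw [if_neg (by rw [hat]; rintro ⟨-, hcol⟩; rw [hcol] at h0; exact absurd h0 (by decide))]
      · -- ends in a non-digit c ≠ ':' (no colon in l at all)
        have hcc : c ≠ ':' := fun h => hc (h ▸ by simp)
        have hat : pvLoopA ((q ++ [c]) ++ s) ((q ++ [c]) ++ s).length = q.length := by
          have h1 : pvLoopA ((q ++ [c]) ++ s) ((q ++ [c]) ++ s).length
              = pvLoopA ((q ++ [c]) ++ s) (q.length + 1) := by
            apply pvLoopA_digits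
            · simp
            · intro m hm hm2
              exact getD_digits (q ++ [c]) s hs m (by simpa using hm) hm2
          rw [h1]
          apply pvLoopA_stop _ _ c _ hcd
          rw [List.append_assoc, List.getD_append_right q ([c] ++ s) ' ' _ le_rfl]
          simp
        have hgd : ((q ++ [c]) ++ s).getD q.length ' ' = c := by
          rw [List.append_assoc, List.getD_append_right q ([c] ++ s) ' ' _ le_rfl]
          simp
        rw [if_neg (by rw [hat, hgd]; exact fun h => hcc h.2)]

-- ===== VERDICT (by name: the statement is the Claim_ definition above) =====
theorem parse_netloc_spec : Claim_equal_parse_netloc := by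
  intro hostport _ _
  show parse_netloc hostport = parse_netloc_alt hostport
  unfold parse_netloc parse_netloc_alt
  exact pv_core (PySem.Chars.strip hostport.toList)
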